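-- pv_equiv track=rewrite | github.com/arehmanaziz/python_firstYear | codes/matrices/Linear Algebra/simplexMethodForMinimization.py | mostPositiveValue
-- ===== SOURCE A (Python) =====
-- def mostPositiveValue(row):
--     largest = row[0]
--     index = 0
--     loop = len(row)
--     for i in range(1, loop):
--         if 0 < row[i] > largest:
--             largest = row[i]
--             index = i
--
--     # Value should be +ve
--     if largest > 0:
--         return index
--     else:   # if values are optimal
--         return -1
-- ===== SOURCE B (Python) =====
-- def mostPositiveValue(row):
--     j = _argmaxFirst(row, 0, len(row))
--     return j if row[j] > 0 else -1
--
-- def _argmaxFirst(row, lo, hi):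
--     """First index of the maximum of row[lo:hi], by divide and conquer."""
--     if hi - lo <= 1:
--         return lo
--     mid = (lo + hi) // 2
--     l = _argmaxFirst(row, lo, mid)
--     r = _argmaxFirst(row, mid, hi)
--     return l if row[l] >= row[r] else r
-- ===== Notes on version B (the rewrite author's own statement) =====
-- stated objective: alternative
-- what changed: B finds the first index of the maximum by recursive divide-and-conquer over index intervals (combining the two halves' argmaxes with a >= tie-break) instead of A's single left-to-right scan tracking a positivity-filtered running maximum and its index.
import Mathlib
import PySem

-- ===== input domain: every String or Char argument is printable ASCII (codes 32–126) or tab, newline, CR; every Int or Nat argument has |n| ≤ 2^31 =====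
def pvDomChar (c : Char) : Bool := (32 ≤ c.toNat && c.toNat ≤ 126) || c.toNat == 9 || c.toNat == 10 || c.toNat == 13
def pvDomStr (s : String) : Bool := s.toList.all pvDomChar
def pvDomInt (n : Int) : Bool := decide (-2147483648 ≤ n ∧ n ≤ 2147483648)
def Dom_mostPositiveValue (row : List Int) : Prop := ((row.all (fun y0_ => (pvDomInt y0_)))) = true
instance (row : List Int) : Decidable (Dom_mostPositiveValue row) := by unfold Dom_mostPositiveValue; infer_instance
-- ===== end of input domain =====

-- B replaces A's single left-to-right index-tracking scan by a divide-and-conquer argmax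
-- over index intervals (objective: alternative).

-- ===== PORT A =====
-- A: single loop over indices 1..len-1 tracking (largest, index), updating only on values that
-- are positive and strictly above the running largest; row[0] on an empty row raises IndexError (Pre_).
def mostPositiveValue (row : List Int) : Int :=
  match row with
  | [] => 0  -- unreachable under Pre_ (row[0] raises IndexError)
  | r0 :: _ =>
    let loop : Int := (row.length : Int)
    let st := (PySem.List.pyRange 1 loop 1).foldl
      (fun (st : Int × Int) i =>
        if 0 < PySem.List.pyGetD row i 0 ∧ st.1 < PySem.List.pyGetD row i 0 then
          (PySem.List.pyGetD row i 0, i)  -- pyGetD is exact here: every i ∈ [1, len) is in range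
        else st) (r0, 0)
    if st.1 > 0 then st.2 else -1

-- ===== PORT B =====
-- B helper _argmaxFirst(row, lo, hi): first index of the maximum of row[lo:hi], divide and conquer.
-- pyGetD is exact here: as called, l and r are always in range.
def argmaxFirst (row : List Int) (lo hi : Int) : Int :=
  if _h : hi - lo ≤ 1 then lo
  else
    let mid := PySem.Int.floordiv (lo + hi) 2
    let l := argmaxFirst row lo mid
    let r := argmaxFirst row mid hi
    if PySem.List.pyGetD row l 0 ≥ PySem.List.pyGetD row r 0 then l else r
termination_by (hi - lo).toNat
decreasing_by
  all_goals
    have h2 : PySem.Int.floordiv (lo + hi) 2 = (lo + hi) / 2 :=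
      PySem.Int.floordiv_eq_ediv_of_pos (by norm_num)
  · omega
  · omega

-- B: j = _argmaxFirst(row, 0, len(row)); return j if row[j] > 0 else -1
-- (row[j] on an empty row raises IndexError, outside Pre_).
def mostPositiveValue_alt (row : List Int) : Int :=
  let j := argmaxFirst row 0 (row.length : Int)
  if PySem.List.pyGetD row j 0 > 0 then j else -1

-- ===== PRECONDITION & SPEC =====
-- Pre_ excludes only the empty list, on which both A and B raise IndexError.
def Pre_mostPositiveValue (row : List Int) : Prop := row ≠ []
instance (row : List Int) : Decidable (Pre_mostPositiveValue row) := by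
  unfold Pre_mostPositiveValue; infer_instance
def pvWitness_mostPositiveValue : List Int := [(-2), 3, 1, 3]

def Spec_mostPositiveValue (row : List Int) (out : Int) : Prop := out = mostPositiveValue_alt row
instance (row : List Int) (out : Int) : Decidable (Spec_mostPositiveValue row out) := by
  unfold Spec_mostPositiveValue; infer_instance

-- ===== CLAIM (what is proved, stated in full; the proofs are below) =====
def Claim_equal_mostPositiveValue : Prop := ∀ (row : List Int), Dom_mostPositiveValue row → Pre_mostPositiveValue row → Spec_mostPositiveValue row (mostPositiveValue row)

-- ===== LEMMAS AND PROOFS =====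

-- Structural form of A's loop: process the remaining suffix carrying the running index.
def auxA : List Int → Int → Int × Int → Int × Int
  | [], _, st => st
  | v :: l, i, st => auxA l (i + 1) (if 0 < v ∧ st.1 < v then (v, i) else st)

-- A's index fold over pyRange a len equals auxA on the dropped suffix.
theorem foldA_eq_auxA (row : List Int) : ∀ (d : List Int) (a : Int), 0 ≤ a →
    row.drop a.toNat = d → ∀ st : Int × Int,
    (PySem.List.pyRange a (row.length : Int) 1).foldl
      (fun (st : Int × Int) i =>
        if 0 < PySem.List.pyGetD row i 0 ∧ st.1 < PySem.List.pyGetD row i 0 then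
          (PySem.List.pyGetD row i 0, i) else st) st
    = auxA d a st := by
  intro d
  induction d with
  | nil =>
    intro a ha hd st
    have hlen : (row.length : Int) ≤ a := by
      by_contra h
      have h1 : a.toNat < row.length := by omega
      rw [List.drop_eq_nil_iff] at hd
      omega
    rw [PySem.List.pyRange_one_eq_nil hlen]; rfl
  | cons v l ih =>
    intro a ha hd st
    have hlt : a.toNat < row.length := by
      by_contra h
      rw [List.drop_eq_nil_of_le (by omega)] at hd
      exact (List.cons_ne_nil v l) hd.symm
    have haI : a < (row.length : Int) := by omega
    have hsome : row[a.toNat]? = some v := by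
      have h0 : (row.drop a.toNat)[0]? = row[a.toNat + 0]? := List.getElem?_drop
      simp [hd] at h0
      exact h0.symm
    have hget : PySem.List.pyGetD row a 0 = v := by
      rw [PySem.List.pyGetD_eq_getElem row (0:Int) ha (by omega)]
      have := List.getElem?_eq_getElem (l := row) (i := a.toNat) hlt
      rw [hsome] at this
      exact (Option.some.inj this).symm
    have hdrop : row.drop (a + 1).toNat = l := by
      have hnat : (a + 1).toNat = a.toNat + 1 := by omega
      rw [hnat, ← List.drop_drop, hd]
      rfl
    rw [PySem.List.pyRange_one_cons haI]
    simp only [List.foldl_cons, hget]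
    rw [ih (a + 1) (by omega) hdrop]
    rfl

-- If no element of the suffix can trigger an update, auxA leaves the state unchanged.
theorem auxA_no_update : ∀ (t : List Int) (i : Int) (st : Int × Int),
    (∀ v ∈ t, ¬(0 < v ∧ st.1 < v)) → auxA t i st = st := by
  intro t
  induction t with
  | nil => intro i st _; rfl
  | cons v l ih =>
    intro i st h
    have hv : ¬(0 < v ∧ st.1 < v) := h v (by simp)
    simp only [auxA, if_neg hv]
    exact ih (i + 1) st (fun u hu => h u (by simp [hu]))

-- Folding max over a doubled seed splits off the extra seed component.
theorem foldl_max_pair : ∀ (l : List Int) (a b : Int),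
    l.foldl max (max a b) = max a (l.foldl max b) := by
  intro l
  induction l with
  | nil => intro a b; rfl
  | cons c l ih =>
    intro a b
    simp only [List.foldl_cons]
    rw [max_assoc, ih]

-- When the global max exceeds the seed and is positive, A's loop ends at (max, i + first index of max).
theorem auxA_hits_max : ∀ (t : List Int) (i L I : Int),
    L < t.foldl max L → 0 < t.foldl max L →
    auxA t i (L, I) = (t.foldl max L, i + (t.idxOf (t.foldl max L) : Int)) := by
  intro t
  induction t with
  | nil => intro i L I h _; simp at h
  | cons v l ih =>
    intro i L I hL hpos
    simp only [List.foldl_cons] at hL hpos ⊢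
    by_cases hv : v = l.foldl max (max L v)
    · -- the head is already the max: one update, then nothing changes
      have hLv : L < v := by rw [← hv] at hL; exact hL
      have hpv : 0 < v := by rw [← hv] at hpos; exact hpos
      have hmaxv : max L v = v := max_eq_right hLv.le
      have hfix : l.foldl max v = v := by
        rw [show l.foldl max v = l.foldl max (max L v) by rw [hmaxv]]
        exact hv.symm
      rw [← hv]
      have hidx : (v :: l).idxOf v = 0 := List.idxOf_cons_self
      rw [hidx]
      simp only [auxA, if_pos (And.intro hpv hLv)]
      rw [auxA_no_update l (i + 1) (v, i) ?_]
      · simp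
      · intro u hu hcon
        have hle := (PySem.List.le_foldl_max l v).2 u hu
        rw [hfix] at hle
        exact absurd hcon.2 (not_lt.mpr hle)
    · -- the head is below the max: either branch keeps the seed below the max
      have hvM : v < l.foldl max (max L v) := by
        have hle : v ≤ l.foldl max (max L v) :=
          le_trans (le_max_right L v) (PySem.List.le_foldl_max l (max L v)).1
        exact lt_of_le_of_ne hle hv
      have hidx : (v :: l).idxOf (l.foldl max (max L v)) = l.idxOf (l.foldl max (max L v)) + 1 :=
        List.idxOf_cons_ne _ hv
      simp only [auxA]
      by_cases hupd : 0 < v ∧ L < v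
      · rw [if_pos hupd]
        have hMv : l.foldl max v = l.foldl max (max L v) := by
          rw [max_eq_right hupd.2.le]
        rw [ih (i + 1) v i (by rw [hMv]; exact hvM) (by rw [hMv]; exact hpos), hMv, hidx]
        refine Prod.ext rfl ?_
        push_cast; ring
      · rw [if_neg hupd]
        have hML : l.foldl max L = l.foldl max (max L v) := by
          rcases not_and_or.mp hupd with h0 | hLv
          · have hsplit : l.foldl max (max v L) = max v (l.foldl max L) := foldl_max_pair l v L
            rw [max_comm v L] at hsplit
            rw [hsplit]
            rcases le_total v (l.foldl max L) with hc | hc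
            · rw [max_eq_right hc]
            · exfalso
              rw [hsplit, max_eq_left hc] at hpos
              omega
          · rw [max_eq_left (by omega)]
        rw [ih (i + 1) L I (by rw [hML]; exact hL) (by rw [hML]; exact hpos), hML, hidx]
        refine Prod.ext rfl ?_
        push_cast; ring

-- A returns the first index of the global maximum when it is positive, else -1.
theorem A_char (r0 : Int) (t : List Int) :
    mostPositiveValue (r0 :: t)
      = if 0 < t.foldl max r0 then (((r0 :: t).idxOf (t.foldl max r0) : Nat) : Int) else -1 := by
  simp only [mostPositiveValue]
  rw [foldA_eq_auxA (r0 :: t) t 1 (by omega) rfl (r0, 0)]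
  by_cases hM : 0 < t.foldl max r0
  · rw [if_pos hM]
    by_cases hr : r0 = t.foldl max r0
    · have hnone : auxA t 1 (r0, 0) = (r0, 0) := by
        apply auxA_no_update
        intro u hu hcon
        have hle := (PySem.List.le_foldl_max t r0).2 u hu
        rw [← hr] at hle
        exact absurd hcon.2 (not_lt.mpr hle)
      rw [hnone]
      rw [if_pos (by omega : r0 > 0)]
      rw [show (r0 :: t).idxOf (t.foldl max r0) = 0 by rw [← hr]; exact List.idxOf_cons_self]
      rfl
    · have hlt : r0 < t.foldl max r0 :=
        lt_of_le_of_ne (PySem.List.le_foldl_max t r0).1 hr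
      rw [auxA_hits_max t 1 r0 0 hlt hM]
      rw [if_pos hM]
      rw [List.idxOf_cons_ne _ (fun h => hr h)]
      push_cast
      ring
  · rw [if_neg hM]
    have hnone : auxA t 1 (r0, 0) = (r0, 0) := by
      apply auxA_no_update
      intro u hu hcon
      have hle := (PySem.List.le_foldl_max t r0).2 u hu
      omega
    rw [hnone]
    rw [if_neg (by have := (PySem.List.le_foldl_max t r0).1; omega : ¬ r0 > 0)]

-- first-occurrence characterisation of idxOf
theorem idxOf_of_first (l : List Int) (v : Int) (j : Nat) (h : j < l.length) (hv : l[j] = v)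
    (hfst : ∀ i (hi : i < l.length), i < j → l[i] ≠ v) : l.idxOf v = j := by
  induction l generalizing j with
  | nil => simp at h
  | cons a t ih =>
    cases j with
    | zero => simp at hv; simp [hv, List.idxOf_cons_self]
    | succ j =>
      have ha : a ≠ v := by
        have := hfst 0 (by omega) (by omega); simpa using this
      rw [List.idxOf_cons_ne _ ha]
      rw [ih j (by simpa using h) (by simpa using hv) ?_]
      intro i hi hij
      have := hfst (i+1) (by simp; omega) (by omega)
      simpa using this

-- B's divide-and-conquer returns an index of [lo, hi) that carries the maximum of the
-- interval and strictly dominates every earlier element of the interval.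
theorem argmaxFirst_spec : ∀ (n : Nat) (row : List Int) (lo hi : Int),
    (hi - lo).toNat ≤ n → 0 ≤ lo → lo < hi → hi ≤ (row.length : Int) →
    lo ≤ argmaxFirst row lo hi ∧ argmaxFirst row lo hi < hi ∧
    (∀ k : Int, lo ≤ k → k < hi →
      PySem.List.pyGetD row k 0 ≤ PySem.List.pyGetD row (argmaxFirst row lo hi) 0) ∧
    (∀ k : Int, lo ≤ k → k < argmaxFirst row lo hi →
      PySem.List.pyGetD row k 0 < PySem.List.pyGetD row (argmaxFirst row lo hi) 0) := by
  intro n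
  induction n with
  | zero => intro row lo hi hn _ hlt _; omega
  | succ n ih =>
    intro row lo hi hn h0 hlt hle
    rw [argmaxFirst]
    by_cases h1 : hi - lo ≤ 1
    · rw [dif_pos h1]
      refine ⟨le_refl lo, by omega, ?_, ?_⟩
      · intro k hk1 hk2
        have : k = lo := by omega
        rw [this]
      · intro k hk1 hk2; omega
    · rw [dif_neg h1]
      have h2 : PySem.Int.floordiv (lo + hi) 2 = (lo + hi) / 2 :=
        PySem.Int.floordiv_eq_ediv_of_pos (by norm_num)
      simp only
      set mid := PySem.Int.floordiv (lo + hi) 2 with hmid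
      have hm1 : lo < mid := by omega
      have hm2 : mid < hi := by omega
      obtain ⟨hl1, hl2, hlmax, hlfst⟩ :=
        ih row lo mid (by omega) h0 hm1 (by omega)
      obtain ⟨hr1, hr2, hrmax, hrfst⟩ :=
        ih row mid hi (by omega) (by omega) hm2 hle
      set l := argmaxFirst row lo mid
      set r := argmaxFirst row mid hi
      by_cases hc : PySem.List.pyGetD row l 0 ≥ PySem.List.pyGetD row r 0
      · rw [if_pos hc]
        refine ⟨by omega, by omega, ?_, ?_⟩
        · intro k hk1 hk2
          by_cases hkm : k < mid
          · exact hlmax k hk1 hkm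
          · exact le_trans (hrmax k (by omega) hk2) hc
        · intro k hk1 hk2
          exact hlfst k hk1 hk2
      · rw [if_neg hc]
        push Not at hc
        refine ⟨by omega, by omega, ?_, ?_⟩
        · intro k hk1 hk2
          by_cases hkm : k < mid
          · exact lt_of_le_of_lt (hlmax k hk1 hkm) hc |>.le
          · exact hrmax k (by omega) hk2
        · intro k hk1 hk2
          by_cases hkm : k < mid
          · exact lt_of_le_of_lt (hlmax k hk1 hkm) hc
          · exact hrfst k (by omega) hk2

-- everything in the row is bounded by the seeded fold of max
theorem mem_le_foldl_max (r0 : Int) (t : List Int) (u : Int) (hu : u ∈ r0 :: t) :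
    u ≤ t.foldl max r0 := by
  rcases List.mem_cons.mp hu with h | h
  · rw [h]; exact (PySem.List.le_foldl_max t r0).1
  · exact (PySem.List.le_foldl_max t r0).2 u h

-- B returns the first index of the global maximum when it is positive, else -1.
theorem B_char (r0 : Int) (t : List Int) :
    mostPositiveValue_alt (r0 :: t)
      = if 0 < t.foldl max r0 then (((r0 :: t).idxOf (t.foldl max r0) : Nat) : Int) else -1 := by
  simp only [mostPositiveValue_alt]
  set row := r0 :: t with hrow
  have hlen : 0 < (row.length : Int) := by simp [hrow]
  obtain ⟨hj1, hj2, hmax, hfst⟩ :=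
    argmaxFirst_spec (row.length) row 0 (row.length : Int) (by omega) (le_refl 0) hlen (le_refl _)
  set j := argmaxFirst row 0 (row.length : Int) with hj
  set M := t.foldl max r0 with hM
  have hgetj : PySem.List.pyGetD row j 0 = row[j.toNat] :=
    PySem.List.pyGetD_eq_getElem row (0:Int) hj1 hj2
  have hjlen : j.toNat < row.length := by omega
  -- the value at j is exactly the global maximum
  have hval : row[j.toNat] = M := by
    apply le_antisymm
    · exact mem_le_foldl_max r0 t _ (List.getElem_mem hjlen)
    · have hmem : M ∈ row := by
        rcases PySem.List.foldl_max_mem t r0 with h | h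
        · rw [hM, h]; exact List.mem_cons_self
        · exact List.mem_cons_of_mem _ h
      obtain ⟨k, hk, hkv⟩ := List.mem_iff_getElem.mp hmem
      have := hmax (k : Int) (by omega) (by omega)
      rw [hgetj, PySem.List.pyGetD_eq_getElem row (0:Int) (by omega) (by omega)] at this
      simp only [Int.toNat_natCast] at this
      rw [hkv] at this
      exact this
  by_cases hpos : 0 < M
  · rw [if_pos hpos]
    rw [if_pos (by rw [hgetj, hval]; exact hpos)]
    have hidx : row.idxOf M = j.toNat := by
      apply idxOf_of_first row M j.toNat hjlen hval
      intro i hi hij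
      have := hfst (i : Int) (by omega) (by omega)
      rw [hgetj, hval, PySem.List.pyGetD_eq_getElem row (0:Int) (by omega) (by omega)] at this
      simp only [Int.toNat_natCast] at this
      omega
    rw [hidx]
    omega
  · rw [if_neg hpos]
    rw [if_neg (by rw [hgetj, hval]; omega)]

-- ===== VERDICT (by name: the statement is the Claim_ definition above) =====
theorem mostPositiveValue_spec : Claim_equal_mostPositiveValue := by
  intro row _ hpre
  unfold Spec_mostPositiveValue
  match row with
  | [] => exact absurd rfl hpre
  | r0 :: t => rw [A_char, B_char]
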